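-- pv_equiv track=rewrite | github.com/troycomi/microMS | CoordinateMappers/oMaldiMapper.py | SlopCorrection
-- ===== SOURCE A (Python) =====
-- def SlopCorrection(points, xcorr, ycorr):
--     '''
--     Attempts to correct for linear actuator motor slop in the stage.
--     As the stage changes direction from positive to negative direction
--     in either axis, a constant value is added or subtracted to make the stage
--     move a little further or less depending on slop in drive screw.
--     assume start at spot 43, equal x and y slop, apply when changing directions
--     pattern value at start is 5,5 coming in direction of 6,4
--     points: list of points to visit
--     xcorr: x slop correction value
--     ycorr: y slop correction value
--     returns a new list of points with slop correction
--     '''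
--     path = []
--     output = []
--     #path contains the last "two points visited" in x and y
--     #to determine what kind of slope correction, if any, to apply
--     path.append((6,4))
--     path.append((5,5))
--     xslop = 0
--     yslop = 0
--     for p in points:
--         path.append(p)
--         #update xslop
--         # +-
--         if path[0][0] < path[1][0] and path[1][0] > path[2][0]:
--             xslop -= xcorr
--         #-+
--         elif path[0][0] > path[1][0] and path[1][0] < path[2][0]:
--             xslop += xcorr
--         #no change, forward point
--         elif path[1][0] == path[2][0]:
--             path[1] = (path[0][0], path[1][1])
--         #update yslop
--         # +-
--         if path[0][1] < path[1][1] and path[1][1] > path[2][1]: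
--             yslop -= ycorr
--         #-+
--         elif path[0][1] > path[1][1] and path[1][1] < path[2][1]:
--             yslop += ycorr
--         #no change, forward point
--         elif path[1][1] == path[2][1]:
--             path[1] = (path[1][0], path[0][1])
--
--         output.append((p[0]+xslop,p[1]+yslop))
--         path.pop(0)
--     return output
-- ===== SOURCE B (Python) =====
-- def SlopCorrection(points, xcorr, ycorr):
--     # Per axis, the slop offset is a pure function of the current movement
--     # direction (sign of the last nonzero delta): x axis adds xcorr while
--     # moving up and 0 while moving down; y axis adds -ycorr while moving
--     # down and 0 while moving up.  Seeds: x starts moving down (6->5),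
--     # y starts moving up (4->5).
--     out = []
--     up_x, last_x = False, 5
--     up_y, last_y = True, 5
--     for x, y in points:
--         if x != last_x:
--             up_x = x > last_x
--             last_x = x
--         if y != last_y:
--             up_y = y > last_y
--             last_y = y
--         out.append((x + (xcorr if up_x else 0),
--                     y + (0 if up_y else -ycorr)))
--     return out
-- ===== Notes on version B (the rewrite author's own statement) =====
-- stated objective: alternative
-- what changed: A's turn-detection state machine with two running slop accumulators over a mutable two-point path window is replaced by the observation that each axis's slop offset is a pure closed-form function of the current movement direction (x: xcorr while moving up, 0 while down; y: -ycorr while moving down, 0 while up), so B keeps only a direction bit and the last coordinate per axis and never accumulates or detects turns.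
import Mathlib
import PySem

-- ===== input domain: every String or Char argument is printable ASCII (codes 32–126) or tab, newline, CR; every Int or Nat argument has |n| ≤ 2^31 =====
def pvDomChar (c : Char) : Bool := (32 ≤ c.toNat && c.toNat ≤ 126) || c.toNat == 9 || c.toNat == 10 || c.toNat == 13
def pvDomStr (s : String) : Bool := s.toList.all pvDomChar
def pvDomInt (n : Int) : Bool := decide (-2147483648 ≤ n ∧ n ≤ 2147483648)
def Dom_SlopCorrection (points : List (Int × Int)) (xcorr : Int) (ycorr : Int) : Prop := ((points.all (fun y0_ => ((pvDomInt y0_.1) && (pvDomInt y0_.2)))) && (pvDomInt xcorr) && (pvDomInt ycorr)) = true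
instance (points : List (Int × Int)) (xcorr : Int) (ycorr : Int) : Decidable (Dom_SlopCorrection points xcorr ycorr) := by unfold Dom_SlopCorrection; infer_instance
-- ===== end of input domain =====

-- B replaces A's turn-detecting slop accumulators by a per-axis direction bit
-- whose value determines the offset in closed form (objective: alternative algorithm).

-- ===== PORT A =====
-- A's loop keeps path = [path0, path1, p] (last two visited points plus current),
-- both slop accumulators, and appends to output; the `elif equal` branches mutate
-- path[1] coordinate-wise before it becomes path0 via path.pop(0).
def SlopCorrectionGo (xcorr ycorr : Int) : Int × Int → Int × Int → Int → Int → List (Int × Int) → List (Int × Int)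
  | _, _, _, _, [] => []
  | p0, p1, xslop, yslop, p :: rest =>
    -- x branches: slop update, and path[1] x-mutation in the final elif
    let xslop' := if p0.1 < p1.1 ∧ p1.1 > p.1 then xslop - xcorr
                  else if p0.1 > p1.1 ∧ p1.1 < p.1 then xslop + xcorr
                  else xslop
    let p1x := if p0.1 < p1.1 ∧ p1.1 > p.1 then p1.1
               else if p0.1 > p1.1 ∧ p1.1 < p.1 then p1.1
               else if p1.1 = p.1 then p0.1 else p1.1
    -- y branches
    let yslop' := if p0.2 < p1.2 ∧ p1.2 > p.2 then yslop - ycorr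
                  else if p0.2 > p1.2 ∧ p1.2 < p.2 then yslop + ycorr
                  else yslop
    let p1y := if p0.2 < p1.2 ∧ p1.2 > p.2 then p1.2
               else if p0.2 > p1.2 ∧ p1.2 < p.2 then p1.2
               else if p1.2 = p.2 then p0.2 else p1.2
    (p.1 + xslop', p.2 + yslop') :: SlopCorrectionGo xcorr ycorr (p1x, p1y) p xslop' yslop' rest

def SlopCorrection (points : List (Int × Int)) (xcorr : Int) (ycorr : Int) : List (Int × Int) :=
  SlopCorrectionGo xcorr ycorr (6, 4) (5, 5) 0 0 points

-- ===== PORT B =====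
-- B's loop state per Source B: a direction bit and the last coordinate per axis;
-- the appended offsets are pure functions of the direction bits.
def SlopCorrectionAltGo (xcorr ycorr : Int) : Bool → Int → Bool → Int → List (Int × Int) → List (Int × Int)
  | _, _, _, _, [] => []
  | upX, lastX, upY, lastY, (x, y) :: rest =>
    let upX' := if x ≠ lastX then decide (x > lastX) else upX
    let lastX' := if x ≠ lastX then x else lastX
    let upY' := if y ≠ lastY then decide (y > lastY) else upY
    let lastY' := if y ≠ lastY then y else lastY
    (x + (if upX' then xcorr else 0), y + (if upY' then 0 else -ycorr)) ::
      SlopCorrectionAltGo xcorr ycorr upX' lastX' upY' lastY' rest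

def SlopCorrection_alt (points : List (Int × Int)) (xcorr : Int) (ycorr : Int) : List (Int × Int) :=
  SlopCorrectionAltGo xcorr ycorr false 5 true 5 points

-- ===== PRECONDITION & SPEC =====
def Spec_SlopCorrection (points : List (Int × Int)) (xcorr : Int) (ycorr : Int) (out : List (Int × Int)) : Prop := out = SlopCorrection_alt points xcorr ycorr
instance (points : List (Int × Int)) (xcorr : Int) (ycorr : Int) (out : List (Int × Int)) : Decidable (Spec_SlopCorrection points xcorr ycorr out) := by unfold Spec_SlopCorrection; infer_instance

-- ===== CLAIM =====
def Claim_equal_SlopCorrection : Prop := ∀ (points : List (Int × Int)) (xcorr : Int) (ycorr : Int), Dom_SlopCorrection points xcorr ycorr → Spec_SlopCorrection points xcorr ycorr (SlopCorrection points xcorr ycorr)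

-- ===== LEMMAS AND PROOFS =====
-- Scalar facts about one axis step: A's window coordinates stay distinct,
-- the slop accumulator stays the closed-form offset of the direction, and
-- A's advanced window orders the same way as B's updated direction bit.
theorem ne_step (a b v : Int) (hab : a ≠ b) :
    (if a < b ∧ b > v then b else if a > b ∧ b < v then b else if b = v then a else b) ≠ v := by
  split_ifs <;> omega

theorem dir_step (a b v : Int) (_hab : a ≠ b) :
    decide ((if a < b ∧ b > v then b else if a > b ∧ b < v then b else if b = v then a else b) < v) =
    (if v ≠ b then decide (v > b) else decide (a < b)) := by
  split_ifs <;> simp <;> omega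

theorem last_step (b v : Int) : (if v ≠ b then v else b) = v := by
  split_ifs <;> omega

theorem inv_step_x (c a b v s : Int) (hab : a ≠ b) (hs : s = if a < b then c else 0) :
    (if a < b ∧ b > v then s - c else if a > b ∧ b < v then s + c else s) =
    if (if a < b ∧ b > v then b else if a > b ∧ b < v then b else if b = v then a else b) < v
    then c else 0 := by
  subst hs; split_ifs <;> omega

theorem inv_step_y (c a b v s : Int) (hab : a ≠ b) (hs : s = if a < b then 0 else -c) :
    (if a < b ∧ b > v then s - c else if a > b ∧ b < v then s + c else s) =
    if (if a < b ∧ b > v then b else if a > b ∧ b < v then b else if b = v then a else b) < v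
    then 0 else -c := by
  subst hs; split_ifs <;> omega

-- A's fused loop equals B's direction-bit loop, given the invariant.
theorem go_eq (xcorr ycorr : Int) (points : List (Int × Int)) :
    ∀ (p0 p1 : Int × Int) (xslop yslop : Int),
    p0.1 ≠ p1.1 → p0.2 ≠ p1.2 →
    xslop = (if p0.1 < p1.1 then xcorr else 0) →
    yslop = (if p0.2 < p1.2 then 0 else -ycorr) →
    SlopCorrectionGo xcorr ycorr p0 p1 xslop yslop points =
      SlopCorrectionAltGo xcorr ycorr (decide (p0.1 < p1.1)) p1.1 (decide (p0.2 < p1.2)) p1.2 points := by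
  induction points with
  | nil => intros; simp [SlopCorrectionGo, SlopCorrectionAltGo]
  | cons p rest ih =>
    intro p0 p1 xslop yslop hx hy hxs hys
    obtain ⟨x, y⟩ := p
    simp only [SlopCorrectionGo, SlopCorrectionAltGo]
    rw [← dir_step p0.1 p1.1 x hx, ← dir_step p0.2 p1.2 y hy, last_step p1.1 x, last_step p1.2 y,
        inv_step_x xcorr p0.1 p1.1 x xslop hx hxs, inv_step_y ycorr p0.2 p1.2 y yslop hy hys]
    refine congrArg₂ List.cons ?_ ?_
    · simp only [decide_eq_true_eq]
    · exact ih _ (x, y) _ _ (ne_step p0.1 p1.1 x hx) (ne_step p0.2 p1.2 y hy)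
        rfl rfl

-- ===== VERDICT =====
theorem SlopCorrection_spec : Claim_equal_SlopCorrection := by
  intro points xcorr ycorr _
  unfold Spec_SlopCorrection SlopCorrection SlopCorrection_alt
  have h := go_eq xcorr ycorr points (6, 4) (5, 5) 0 0 (by decide) (by decide)
    (by norm_num) (by norm_num)
  simpa using h
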